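-- pv_equiv track=rewrite | github.com/Ignas/dsm_maker | deps.py | recursive_cluster
-- ===== SOURCE A (Python) =====
-- def count_dependencies(node, edges):
--     return len([node for edge in edges if edge[1] == node])
--
-- def recursive_cluster(nodes, edges):
--     if not nodes:
--         return nodes, edges
--     nodes = sorted(nodes, key=lambda n:count_dependencies(n, edges), reverse=True)
--     top_node = nodes[0]
--     my_nodes = []
--     other_nodes = []
--     for node in nodes[1:]:
--         if (node, top_node) in edges:
--             my_nodes.append(node)
--         else:
--             other_nodes.append(node)
--     nodes = [nodes[0]] + recursive_cluster(my_nodes, edges)[0] + recursive_cluster(other_nodes, edges)[0]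
--     return nodes, edges
-- ===== SOURCE B (Python) =====
-- def count_dependencies(node, edges):
--     return len([node for edge in edges if edge[1] == node])
--
-- def recursive_cluster(nodes, edges):
--     # Iterative pre-order traversal with an explicit stack instead of recursion.
--     if not nodes:
--         return nodes, edges
--     result = []
--     stack = [list(nodes)]
--     while stack:
--         group = stack.pop()
--         if not group:
--             continue
--         group = sorted(group, key=lambda n: count_dependencies(n, edges), reverse=True)
--         top = group[0]
--         result.append(top)
--         my = [n for n in group[1:] if (n, top) in edges]
--         other = [n for n in group[1:] if (n, top) not in edges]
--         stack.append(other)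
--         stack.append(my)
--     return result, edges
-- ===== Notes on version B (the rewrite author's own statement) =====
-- stated objective: alternative
-- what changed: Replaced the double recursion with an iterative pre-order traversal over an explicit stack of node groups, accumulating the output list in one pass.
import Mathlib
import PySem

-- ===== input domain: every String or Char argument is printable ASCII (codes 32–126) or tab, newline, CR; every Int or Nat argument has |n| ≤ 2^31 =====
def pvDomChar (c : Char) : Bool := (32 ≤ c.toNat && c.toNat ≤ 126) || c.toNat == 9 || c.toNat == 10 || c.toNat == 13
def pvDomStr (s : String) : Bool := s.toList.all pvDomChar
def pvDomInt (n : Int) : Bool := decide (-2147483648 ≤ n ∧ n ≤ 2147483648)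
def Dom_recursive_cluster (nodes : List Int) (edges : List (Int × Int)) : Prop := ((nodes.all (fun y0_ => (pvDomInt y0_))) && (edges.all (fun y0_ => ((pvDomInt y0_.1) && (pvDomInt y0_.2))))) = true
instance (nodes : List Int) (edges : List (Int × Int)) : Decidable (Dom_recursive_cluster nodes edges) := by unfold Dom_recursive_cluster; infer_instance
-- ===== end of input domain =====

-- B replaces the double recursion by an iterative pre-order traversal over an explicit stack
-- of node groups (objective: alternative decomposition, no speed claim).

-- ===== PORT A =====
def count_dependencies (node : Int) (edges : List (Int × Int)) : Int :=
  ((edges.filter (fun edge => edge.2 == node)).length : Int)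

def recursive_cluster (nodes : List Int) (edges : List (Int × Int)) : List Int × (List (Int × Int)) :=
  if nodes = [] then (nodes, edges)
  else
    match h : PySem.List.sorted nodes (fun n => count_dependencies n edges) true with
    | [] => (nodes, edges)   -- unreachable: sorted of a non-empty list is non-empty (totality guard only)
    | top_node :: rest =>
      let my_nodes := rest.filter (fun node => edges.contains (node, top_node))
      let other_nodes := rest.filter (fun node => !edges.contains (node, top_node))
      (top_node :: (recursive_cluster my_nodes edges).1 ++ (recursive_cluster other_nodes edges).1, edges)
termination_by nodes.length
decreasing_by
  all_goals
    have hl := PySem.List.length_sorted nodes (fun n => count_dependencies n edges) true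
    rw [h] at hl
    simp only [List.length_cons] at hl
  · have := List.length_filter_le (fun node => edges.contains (node, top_node)) rest
    omega
  · have := List.length_filter_le (fun node => !edges.contains (node, top_node)) rest
    omega

-- ===== PORT B =====
-- the while loop of Source B: the Lean list's head models the Python stack's top (pop/append at the end)
def clusterLoop (edges : List (Int × Int)) (stack : List (List Int)) (result : List Int) : List Int :=
  match stack with
  | [] => result
  | group :: stack' =>
    if group = [] then clusterLoop edges stack' result
    else
      match h : PySem.List.sorted group (fun n => count_dependencies n edges) true with
      | [] => clusterLoop edges stack' result   -- unreachable totality guard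
      | top :: rest =>
        let my := rest.filter (fun n => edges.contains (n, top))
        let other := rest.filter (fun n => !edges.contains (n, top))
        clusterLoop edges (my :: other :: stack') (result ++ [top])
termination_by (stack.map (fun g => 2 * g.length + 1)).sum
decreasing_by
  all_goals simp only [List.map_cons, List.sum_cons]
  · omega
  · omega
  · have hl := PySem.List.length_sorted group (fun n => count_dependencies n edges) true
    rw [h] at hl
    simp only [List.length_cons] at hl
    have hsum := (List.length_eq_length_filter_add (l := rest) (f := fun n => edges.contains (n, top)))
    simp at hsum ⊢
    omega

def recursive_cluster_alt (nodes : List Int) (edges : List (Int × Int)) : List Int × (List (Int × Int)) :=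
  if nodes = [] then (nodes, edges)
  else (clusterLoop edges [nodes] [], edges)

-- ===== PRECONDITION & SPEC =====
def Spec_recursive_cluster (nodes : List Int) (edges : List (Int × Int)) (out : List Int × (List (Int × Int))) : Prop := out = recursive_cluster_alt nodes edges
instance (nodes : List Int) (edges : List (Int × Int)) (out : List Int × (List (Int × Int))) : Decidable (Spec_recursive_cluster nodes edges out) := by unfold Spec_recursive_cluster; infer_instance

-- ===== CLAIM (what is proved, stated in full; the proofs are below) =====
def Claim_equal_recursive_cluster : Prop := ∀ (nodes : List Int) (edges : List (Int × Int)), Dom_recursive_cluster nodes edges → Spec_recursive_cluster nodes edges (recursive_cluster nodes edges)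

-- ===== LEMMAS AND PROOFS =====

-- A's recursion on the empty list
theorem rc_nil (edges : List (Int × Int)) : recursive_cluster [] edges = ([], edges) := by
  rw [recursive_cluster.eq_def]; rfl

-- one unfolding of A's recursion on a non-empty group, phrased through its sorted form
theorem rc_unfold (group : List Int) (edges : List (Int × Int)) (hg : group ≠ [])
    (top : Int) (rest : List Int)
    (h : PySem.List.sorted group (fun n => count_dependencies n edges) true = top :: rest) :
    recursive_cluster group edges
      = (top :: (recursive_cluster (rest.filter (fun n => edges.contains (n, top))) edges).1
              ++ (recursive_cluster (rest.filter (fun n => !edges.contains (n, top))) edges).1,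
         edges) := by
  rw [recursive_cluster.eq_def, if_neg hg]
  split
  · next h' => rw [h] at h'; cases h'
  · next t r h' =>
      rw [h] at h'
      injection h' with h1 h2
      subst h1; subst h2
      rfl

-- A's result always carries the edges unchanged in the second component
theorem rc_snd (nodes : List Int) (edges : List (Int × Int)) :
    (recursive_cluster nodes edges).2 = edges := by
  rw [recursive_cluster.eq_def]
  split
  · rfl
  · split <;> rfl

-- the loop flushes the stack: it appends A's result for each stacked group, in order
theorem clusterLoop_eq (edges : List (Int × Int)) (stack : List (List Int)) (result : List Int) :
    clusterLoop edges stack result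
      = result ++ (stack.map (fun g => (recursive_cluster g edges).1)).flatten := by
  fun_induction clusterLoop edges stack result
  · simp
  · rename_i result stack' ih
    simp [ih, rc_nil]
  · rename_i result group stack' hg h ih
    exact absurd ((PySem.List.sorted_eq_nil_iff group (fun n => count_dependencies n edges) true).mp h) hg
  · rename_i result group stack' hg top rest h my other ih
    rw [ih]
    simp only [List.map_cons, List.flatten_cons]
    rw [rc_unfold group edges hg top rest h]
    simp [my, other]

theorem recursive_cluster_spec' (nodes : List Int) (edges : List (Int × Int)) :
    recursive_cluster nodes edges = recursive_cluster_alt nodes edges := by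
  by_cases hn : nodes = []
  · subst hn; simp [recursive_cluster, recursive_cluster_alt]
  · rw [recursive_cluster_alt, if_neg hn, clusterLoop_eq]
    simp
    exact Prod.ext_iff.mpr ⟨rfl, rc_snd nodes edges⟩

-- ===== VERDICT (by name: the statement is the Claim_ definition above) =====
theorem recursive_cluster_spec : Claim_equal_recursive_cluster := by
  intro nodes edges _
  unfold Spec_recursive_cluster
  exact recursive_cluster_spec' nodes edges
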